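-- pv_equiv track=rewrite | github.com/jmp1533/FortunaPick | lottery/analyzer.py | _check_consecutive_triplet
-- ===== SOURCE A (Python) =====
-- def _check_consecutive_triplet(numbers):
--     sorted_nums = sorted(numbers)
--     consecutive = 1
--     for i in range(1, len(sorted_nums)):
--         if sorted_nums[i] == sorted_nums[i - 1] + 1:
--             consecutive += 1
--             if consecutive >= 3:
--                 return True
--         else:
--             consecutive = 1
--     return False
-- ===== SOURCE B (Python) =====
-- def _check_consecutive_triplet(numbers):
--     s = set(numbers)
--     return any(n + 1 in s and n + 2 in s for n in s)
-- ===== Notes on version B (the rewrite author's own statement) =====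
-- stated objective: faster
-- what changed: Replaces sort-then-scan with a running streak counter by building a set once and checking membership of n+1 and n+2 for each element.
-- intended difference: On lists that contain a consecutive triple n,n+1,n+2 but where the middle value of every such triple occurs more than once (e.g. [1,2,2,3]), A returns False because the duplicate resets its streak counter; B returns True, the intended answer for detecting three consecutive values. — e.g. on _check_consecutive_triplet([1, 2, 2, 3]): A returns false, B returns true
import Mathlib
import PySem

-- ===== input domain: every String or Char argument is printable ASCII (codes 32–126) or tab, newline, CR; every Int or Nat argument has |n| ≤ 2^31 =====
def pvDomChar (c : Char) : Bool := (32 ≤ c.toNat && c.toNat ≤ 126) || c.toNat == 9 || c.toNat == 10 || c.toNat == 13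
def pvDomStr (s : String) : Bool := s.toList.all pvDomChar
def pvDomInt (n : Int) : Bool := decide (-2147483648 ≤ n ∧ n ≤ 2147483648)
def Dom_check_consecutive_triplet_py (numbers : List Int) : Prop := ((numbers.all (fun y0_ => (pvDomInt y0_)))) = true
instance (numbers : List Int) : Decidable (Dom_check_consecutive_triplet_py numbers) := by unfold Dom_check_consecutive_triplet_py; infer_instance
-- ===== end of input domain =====

-- B replaces A's sort + running-streak scan by a set built once with membership tests (objective: faster);
-- on triples whose middle value is always duplicated A's streak resets and it answers False, B True (see D_ below).

-- ===== PORT A =====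
-- the 'for i in range(1, len)' loop reads s[i] and s[i-1]; ported as recursion
-- carrying (previous element, remaining tail, consecutive counter)
def pvLoopA : Int → List Int → Int → Bool
  | _, [], _ => false
  | prev, x :: rest, consecutive =>
    if x = prev + 1 then
      if consecutive + 1 ≥ 3 then true
      else pvLoopA x rest (consecutive + 1)
    else pvLoopA x rest 1

def check_consecutive_triplet_py (numbers : List Int) : Bool :=
  match PySem.List.sorted numbers (fun x => x) false with
  | [] => false
  | h :: t => pvLoopA h t 1

-- ===== PORT B =====
def check_consecutive_triplet_py_alt (numbers : List Int) : Bool :=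
  let s : PySem.Set Int := PySem.Set.ofList numbers
  s.any (fun n => PySem.Set.contains s (n + 1) && PySem.Set.contains s (n + 2))

-- ===== PRECONDITION & SPEC =====
-- On lists containing a consecutive triple n,n+1,n+2 in which the middle value of every such
-- triple occurs more than once, A returns False (the duplicate resets its streak counter);
-- B returns True, the intended answer for detecting three consecutive values.
def D_check_consecutive_triplet_py (numbers : List Int) : Prop :=
  (∃ n ∈ numbers, (n + 1) ∈ numbers ∧ (n + 2) ∈ numbers) ∧
  (∀ n ∈ numbers, (n + 2) ∈ numbers → numbers.count (n + 1) ≠ 1)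
instance (numbers : List Int) : Decidable (D_check_consecutive_triplet_py numbers) := by
  unfold D_check_consecutive_triplet_py; infer_instance

def Spec_check_consecutive_triplet_py (numbers : List Int) (out : Bool) : Prop :=
  ¬ D_check_consecutive_triplet_py numbers → out = check_consecutive_triplet_py_alt numbers
instance (numbers : List Int) (out : Bool) : Decidable (Spec_check_consecutive_triplet_py numbers out) := by
  unfold Spec_check_consecutive_triplet_py; infer_instance

def pvDiffWitness_check_consecutive_triplet_py : List Int := [1, 2, 2, 3]
def pvDiffWitnessOut_check_consecutive_triplet_py : Bool × Bool := (false, true)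

-- ===== CLAIM (what is proved, stated in full; the proofs are below) =====
def Claim_unchanged_check_consecutive_triplet_py : Prop := ∀ (numbers : List Int), Dom_check_consecutive_triplet_py numbers → Spec_check_consecutive_triplet_py numbers (check_consecutive_triplet_py numbers)
def Claim_changed_check_consecutive_triplet_py : Prop := Dom_check_consecutive_triplet_py (pvDiffWitness_check_consecutive_triplet_py) ∧ D_check_consecutive_triplet_py (pvDiffWitness_check_consecutive_triplet_py) ∧ check_consecutive_triplet_py (pvDiffWitness_check_consecutive_triplet_py) = pvDiffWitnessOut_check_consecutive_triplet_py.1 ∧ check_consecutive_triplet_py_alt (pvDiffWitness_check_consecutive_triplet_py) = pvDiffWitnessOut_check_consecutive_triplet_py.2 ∧ pvDiffWitnessOut_check_consecutive_triplet_py.1 ≠ pvDiffWitnessOut_check_consecutive_triplet_py.2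
def Claim_exact_check_consecutive_triplet_py : Prop := ∀ (numbers : List Int), Dom_check_consecutive_triplet_py numbers → D_check_consecutive_triplet_py numbers → check_consecutive_triplet_py numbers ≠ check_consecutive_triplet_py_alt numbers

-- ===== LEMMAS AND PROOFS =====

-- "some three adjacent entries form n, n+1, n+2": the window characterisation of A's loop
def pvTrip : List Int → Bool
  | a :: b :: c :: t => (decide (b = a + 1) && decide (c = a + 2)) || pvTrip (b :: c :: t)
  | _ => false

theorem pvTrip_cons (a : Int) (t : List Int) (h : pvTrip t = true) :
    pvTrip (a :: t) = true := by
  match t with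
  | [] => simp [pvTrip] at h
  | [b] => simp [pvTrip] at h
  | b :: c :: t' => simp [pvTrip] at h ⊢; right; exact h

theorem pvLoopA_eq (rest : List Int) : ∀ prev : Int,
    pvLoopA prev rest 1 = pvTrip (prev :: rest) ∧
    pvLoopA prev rest 2 =
      ((match rest with | x :: _ => decide (x = prev + 1) | [] => false) ||
        pvTrip (prev :: rest)) := by
  induction rest with
  | nil => intro prev; simp [pvLoopA, pvTrip]
  | cons x r ih =>
    intro prev
    obtain ⟨ih1, ih2⟩ := ih x
    constructor
    · by_cases hx : x = prev + 1
      · simp only [pvLoopA, if_pos hx]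
        norm_num
        rw [ih2]
        match r with
        | [] => simp [pvTrip]
        | c :: r' =>
          simp only [pvTrip]
          subst hx
          by_cases hc : c = prev + 1 + 1 <;> simp [hc] <;> omega
      · simp only [pvLoopA, if_neg hx]
        rw [ih1]
        match r with
        | [] => simp [pvTrip]
        | c :: r' => simp [pvTrip, hx]
    · by_cases hx : x = prev + 1
      · simp [pvLoopA, hx]
      · simp only [pvLoopA, if_neg hx]
        rw [ih1]
        match r with
        | [] => simp [pvTrip, hx]
        | c :: r' => simp [pvTrip, hx]

-- A's exact semantics
def pvSpecA (l : List Int) : Prop :=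
  ∃ n : Int, n ∈ l ∧ l.count (n + 1) = 1 ∧ (n + 2) ∈ l

-- B's semantics
def pvSpecB (l : List Int) : Prop :=
  ∃ n ∈ l, (n + 1) ∈ l ∧ (n + 2) ∈ l

-- on a sorted list, the adjacent-window test is exactly pvSpecA
theorem pvTrip_iff (s : List Int) (hs : s.Pairwise (· ≤ ·)) :
    pvTrip s = true ↔ pvSpecA s := by
  induction s with
  | nil => simp [pvTrip, pvSpecA]
  | cons a t ih =>
    rw [List.pairwise_cons] at hs
    obtain ⟨ha, ht⟩ := hs
    constructor
    · -- forward
      intro h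
      match t, ha, ht, ih, h with
      | b :: c :: t', ha, ht, ih, h =>
        simp only [pvTrip, Bool.or_eq_true, Bool.and_eq_true, decide_eq_true_eq] at h
        rcases h with ⟨hb, hc⟩ | h
        · refine ⟨a, by simp, ?_, by simp [hc]⟩
          have hbt : ∀ y ∈ t', a + 2 ≤ y := by
            intro y hy
            have h1 : c ≤ y := by
              rw [List.pairwise_cons] at ht
              have h2 := ht.2
              rw [List.pairwise_cons] at h2
              exact h2.1 y hy
            omega
          have h0 : (t' : List Int).count (a + 1) = 0 := by
            rw [List.count_eq_zero]
            intro hmem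
            have := hbt _ hmem
            omega
          simp [h0, hb, hc]
        · obtain ⟨n, hn, hcnt, hn2⟩ := (ih ht).mp h
          refine ⟨n, by simp [hn], ?_, by simp [hn2]⟩
          have han : a ≤ n := ha n hn
          have hne : ¬ a = n + 1 := by omega
          simp [hcnt, hne]
    · -- backward
      rintro ⟨n, hn, hcnt, hn2⟩
      by_cases han : a = n
      · -- head is n
        subst han
        have hmem1 : (a + 1) ∈ a :: t := List.count_pos_iff.mp (by omega)
        have h1t : (a + 1) ∈ t := by
          rcases List.mem_cons.mp hmem1 with h | h
          · omega
          · exact h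
        cases t with
        | nil => simp at h1t
        | cons b t' =>
          rw [List.pairwise_cons] at ht
          obtain ⟨hb, ht'⟩ := ht
          have hab : a ≤ b := ha b (by simp)
          have hble : b ≤ a + 1 := by
            rcases List.mem_cons.mp h1t with h | h
            · omega
            · exact hb _ h
          by_cases hbn : b = a
          · -- duplicate head: recurse into the tail
            subst hbn
            apply pvTrip_cons
            apply (ih (List.pairwise_cons.mpr ⟨hb, ht'⟩)).mpr
            refine ⟨b, by simp, ?_, ?_⟩
            · rw [List.count_cons] at hcnt
              have hne : b + 1 ≠ b := by omega
              simpa [hne] using hcnt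
            · rcases List.mem_cons.mp hn2 with h | h
              · omega
              · exact h
          · -- the successor sits right after the head
            have hb1 : b = a + 1 := by omega
            subst hb1
            have hcnt' : (t' : List Int).count (a + 1) = 0 := by
              rw [List.count_cons, List.count_cons] at hcnt
              simp at hcnt
              omega
            have hnot : (a + 1) ∉ t' := List.count_eq_zero.mp hcnt'
            have hn2t' : (a + 2) ∈ t' := by
              rcases List.mem_cons.mp hn2 with h | h
              · omega
              · rcases List.mem_cons.mp h with h | h
                · omega
                · exact h
            cases t' with
            | nil => simp at hn2t'
            | cons c t'' =>
              have hc1 : a + 1 ≤ c := hb c (by simp)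
              have hcne : c ≠ a + 1 := by
                intro hc
                exact hnot (hc ▸ List.mem_cons_self)
              have hcle : c ≤ a + 2 := by
                rcases List.mem_cons.mp hn2t' with h | h
                · omega
                · rw [List.pairwise_cons] at ht'
                  exact ht'.1 _ h
              have hc2 : c = a + 2 := by omega
              simp [pvTrip, hc2]
      · -- n strictly inside the tail
        have hnt : n ∈ t := by
          rcases List.mem_cons.mp hn with h | h
          · exact absurd h.symm han
          · exact h
        have han' : a ≤ n := ha n hnt
        apply pvTrip_cons
        apply (ih ht).mpr
        refine ⟨n, hnt, ?_, ?_⟩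
        · have hne : ¬ a = n + 1 := by omega
          rw [List.count_cons] at hcnt
          simpa [hne] using hcnt
        · rcases List.mem_cons.mp hn2 with h | h
          · omega
          · exact h

theorem portA_iff (numbers : List Int) :
    check_consecutive_triplet_py numbers = true ↔ pvSpecA numbers := by
  unfold check_consecutive_triplet_py
  have hperm : (PySem.List.sorted numbers (fun x => x) false).Perm numbers :=
    PySem.List.sorted_perm numbers _ _
  have hpw : (PySem.List.sorted numbers (fun x => x) false).Pairwise (· ≤ ·) := by
    simpa using PySem.List.sorted_pairwise numbers (fun x => x)
  have hspec : pvSpecA (PySem.List.sorted numbers (fun x => x) false) ↔ pvSpecA numbers := by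
    unfold pvSpecA
    constructor <;> rintro ⟨n, h1, h2, h3⟩ <;>
      exact ⟨n, by first | exact hperm.mem_iff.mp h1 | exact hperm.mem_iff.mpr h1,
             by rw [← h2]; first | exact (hperm.count_eq _).symm | exact hperm.count_eq _,
             by first | exact hperm.mem_iff.mp h3 | exact hperm.mem_iff.mpr h3⟩
  rw [← hspec]
  cases hE : PySem.List.sorted numbers (fun x => x) false with
  | nil => simp [pvSpecA]
  | cons h t =>
    show pvLoopA h t 1 = true ↔ pvSpecA (h :: t)
    rw [(pvLoopA_eq t h).1, pvTrip_iff (h :: t) (hE ▸ hpw)]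

theorem portB_iff (numbers : List Int) :
    check_consecutive_triplet_py_alt numbers = true ↔ pvSpecB numbers := by
  unfold check_consecutive_triplet_py_alt pvSpecB
  simp only [List.any_eq_true, PySem.Set.contains_iff, PySem.Set.mem_ofList,
    Bool.and_eq_true]

theorem specA_implies_specB (l : List Int) (h : pvSpecA l) : pvSpecB l := by
  obtain ⟨n, hn, hcnt, h2⟩ := h
  exact ⟨n, hn, List.count_pos_iff.mp (by omega), h2⟩

theorem D_iff (l : List Int) :
    D_check_consecutive_triplet_py l ↔ pvSpecB l ∧ ¬ pvSpecA l := by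
  unfold D_check_consecutive_triplet_py pvSpecB pvSpecA
  constructor
  · rintro ⟨h1, h2⟩
    refine ⟨h1, ?_⟩
    rintro ⟨n, hn, hcnt, hn2⟩
    exact h2 n hn hn2 hcnt
  · rintro ⟨h1, h2⟩
    push Not at h2
    refine ⟨h1, fun n hn hn2 hcnt => ?_⟩
    exact absurd hn2 (fun h => (h2 n hn hcnt h).elim)

-- ===== VERDICT (by name: the statements are the Claim_ definitions above) =====
theorem check_consecutive_triplet_py_spec : Claim_unchanged_check_consecutive_triplet_py := by
  intro numbers _ hnd
  rw [D_iff] at hnd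
  cases hA : check_consecutive_triplet_py numbers with
  | true =>
    have := specA_implies_specB numbers ((portA_iff numbers).mp hA)
    exact ((portB_iff numbers).mpr this).symm
  | false =>
    by_cases hB : pvSpecB numbers
    · have hAspec : pvSpecA numbers := by
        by_contra hna
        exact hnd ⟨hB, hna⟩
      have := (portA_iff numbers).mpr hAspec
      rw [hA] at this; exact absurd this (by simp)
    · have : ¬ check_consecutive_triplet_py_alt numbers = true := fun h =>
        hB ((portB_iff numbers).mp h)
      simp at this; exact this.symm

theorem check_consecutive_triplet_py_changed : Claim_changed_check_consecutive_triplet_py := by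
  unfold Claim_changed_check_consecutive_triplet_py; decide

theorem check_consecutive_triplet_py_tight : Claim_exact_check_consecutive_triplet_py := by
  intro numbers _ hd
  rw [D_iff] at hd
  obtain ⟨hB, hnA⟩ := hd
  have hb := (portB_iff numbers).mpr hB
  have ha : check_consecutive_triplet_py numbers ≠ true := fun h =>
    hnA ((portA_iff numbers).mp h)
  rw [hb]; exact ha
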